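-- pv_equiv track=rewrite | github.com/892132abhi/LeetcodeSolutions | 2553-separate-the-digits-in-an-array/2553-separate-the-digits-in-an-array.py | separateDigits
-- ===== SOURCE A (Python) =====
-- def separateDigits(nums):
--     """
--     :type nums: List[int]
--     :rtype: List[int]
--     """
--     num1 = [str(i) for i in nums]
--     res=[]
--     for i in num1:
--         if len(i)>1:
--             for j in i:
--                 res.append(int(j))
--         else:
--             res.append(int(i))
--     return res
-- ===== SOURCE B (Python) =====
-- def separateDigits(nums):
--     """Arithmetic digit extraction (mod/div) instead of string conversion."""
--     res = []
--     for n in nums: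
--         if n == 0:
--             res.append(0)
--         else:
--             ds = []
--             while n > 0:
--                 ds.append(n % 10)
--                 n //= 10
--             res.extend(reversed(ds))
--     return res
-- ===== Notes on version B (the rewrite author's own statement) =====
-- stated objective: alternative
-- what changed: Extracts digits arithmetically (repeated %10 and //10, then reversing the per-number digit list) instead of converting each number to a string and parsing each character back with int().
import Mathlib
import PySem

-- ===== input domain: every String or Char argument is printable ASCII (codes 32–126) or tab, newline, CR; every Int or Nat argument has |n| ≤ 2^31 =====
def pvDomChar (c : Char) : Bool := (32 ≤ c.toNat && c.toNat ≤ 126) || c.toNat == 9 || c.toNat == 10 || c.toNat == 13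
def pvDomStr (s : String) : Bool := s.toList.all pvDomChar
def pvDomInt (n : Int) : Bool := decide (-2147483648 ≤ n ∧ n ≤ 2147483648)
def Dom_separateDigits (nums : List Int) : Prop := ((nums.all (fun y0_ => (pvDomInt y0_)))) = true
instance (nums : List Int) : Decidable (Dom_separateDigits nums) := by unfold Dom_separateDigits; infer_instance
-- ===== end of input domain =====

-- B extracts digits arithmetically (%10, //10, reverse) instead of via string conversion; alternative, same cost.
-- Pre_ excludes negative numbers, on which A raises ValueError (int('-')).


-- ===== PORT A =====
-- int(j) for a character / int(s) for a string; `none` is Python's ValueError,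
-- which Pre_ excludes (it only occurs for negative inputs), so `.getD 0` is never taken on Pre_.
def pvIntOfChar (j : Char) : Int := (PySem.Int.ofChars? [j]).getD 0
def pvIntOfChars (s : List Char) : Int := (PySem.Int.ofChars? s).getD 0

def separateDigits (nums : List Int) : List Int :=
  let num1 := nums.map (fun i => PySem.Int.toChars i)   -- str(i), as its character list
  num1.foldl (fun res i =>
    if i.length > 1 then
      i.foldl (fun res j => res ++ [pvIntOfChar j]) res
    else
      res ++ [pvIntOfChars i]) []

-- ===== PORT B =====
-- the `while n > 0: ds.append(n % 10); n //= 10` loop of Source B (ds least-significant first)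
def pvDigitsRev (n : Int) : List Int :=
  if _h : 0 < n then PySem.Int.mod n 10 :: pvDigitsRev (PySem.Int.floordiv n 10) else []
termination_by n.toNat
decreasing_by
  rw [PySem.Int.floordiv_eq_ediv_of_pos (by norm_num)]
  omega

def separateDigits_alt (nums : List Int) : List Int :=
  nums.foldl (fun res n =>
    if n == 0 then res ++ [0] else res ++ (pvDigitsRev n).reverse) []

-- ===== PRECONDITION & SPEC =====
-- Pre_ excludes exactly the inputs containing a negative number: there A raises ValueError
-- (str(i) starts with '-', len > 1, and int('-') fails).
def Pre_separateDigits (nums : List Int) : Prop := ∀ n ∈ nums, 0 ≤ n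
instance (nums : List Int) : Decidable (Pre_separateDigits nums) := by unfold Pre_separateDigits; infer_instance
def pvWitness_separateDigits : List Int := [0, 7, 123, 2553]

def Spec_separateDigits (nums : List Int) (out : List Int) : Prop := out = separateDigits_alt nums
instance (nums : List Int) (out : List Int) : Decidable (Spec_separateDigits nums out) := by unfold Spec_separateDigits; infer_instance

-- ===== CLAIM (what is proved, stated in full; the proofs are below) =====
def Claim_equal_separateDigits : Prop := ∀ (nums : List Int), Dom_separateDigits nums → Pre_separateDigits nums → Spec_separateDigits nums (separateDigits nums)

-- ===== LEMMAS AND PROOFS =====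

-- the decimal digit characters of m, most significant first (what str(m) produces for m ≥ 0)
def natDig (m : Nat) : List Char :=
  if _h : m < 10 then [Nat.digitChar m]
  else natDig (m / 10) ++ [Nat.digitChar (m % 10)]
termination_by m
decreasing_by exact Nat.div_lt_self (by omega) (by omega)

lemma toDigitsCore_eq_natDig (fuel : Nat) : ∀ (m : Nat) (ds : List Char), m < fuel →
    Nat.toDigitsCore 10 fuel m ds = natDig m ++ ds := by
  induction fuel with
  | zero => intro m ds h; omega
  | succ fuel ih =>
    intro m ds h
    rw [Nat.toDigitsCore, natDig]
    by_cases h10 : m < 10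
    · have : m / 10 = 0 := Nat.div_eq_of_lt h10
      simp [this, h10, Nat.mod_eq_of_lt h10]
    · have hd : ¬ m / 10 = 0 := by
        intro hz; exact h10 (by omega : m < 10)
      simp only [hd, dif_neg h10]
      rw [ih (m / 10) _ (by
        have := Nat.div_lt_self (by omega : 0 < m) (by omega : 1 < 10)
        omega)]
      simp

lemma toChars_eq_natDig (n : Int) (h : 0 ≤ n) : PySem.Int.toChars n = natDig n.toNat := by
  rw [PySem.Int.toChars, if_neg (by omega)]
  rw [Nat.toDigits, toDigitsCore_eq_natDig _ _ _ (Nat.lt_succ_self _)]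
  simp

lemma pvIntOfChar_digitChar (d : Nat) (h : d < 10) : pvIntOfChar (Nat.digitChar d) = (d : Int) := by
  interval_cases d <;> decide

lemma natDig_ne_nil (m : Nat) : natDig m ≠ [] := by
  rw [natDig]; split <;> simp

lemma natDig_length_of_lt (m : Nat) (h : m < 10) : (natDig m).length = 1 := by
  rw [natDig, dif_pos h]; rfl

lemma natDig_length_of_ge (m : Nat) (h : 10 ≤ m) : 1 < (natDig m).length := by
  rw [natDig, dif_neg (by omega)]
  have := natDig_ne_nil (m / 10)
  have : 0 < (natDig (m / 10)).length := List.length_pos_iff.mpr this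
  simp; omega

lemma pvDigitsRev_natCast (m : Nat) (h : 0 < m) :
    pvDigitsRev (m : Int) = ((m % 10 : Nat) : Int) :: pvDigitsRev ((m / 10 : Nat) : Int) := by
  rw [pvDigitsRev, dif_pos (by exact_mod_cast h)]
  rw [show (10:Int) = ((10:Nat):Int) from rfl, PySem.Int.mod_natCast, PySem.Int.floordiv_natCast]

lemma map_natDig_eq (m : Nat) (h : 0 < m) :
    (natDig m).map pvIntOfChar = (pvDigitsRev (m : Int)).reverse := by
  induction m using Nat.strong_induction_on with
  | _ m ih =>
    rw [pvDigitsRev_natCast m h, natDig]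
    by_cases h10 : m < 10
    · have hz : m / 10 = 0 := Nat.div_eq_of_lt h10
      rw [dif_pos h10]
      simp [hz, pvDigitsRev, pvIntOfChar_digitChar m h10, Nat.mod_eq_of_lt h10]
    · rw [dif_neg h10]
      have hpos : 0 < m / 10 := Nat.div_pos (by omega) (by omega)
      rw [List.map_append,
        ih (m / 10) (Nat.div_lt_self (by omega) (by omega)) hpos]
      simp [pvIntOfChar_digitChar (m % 10) (Nat.mod_lt m (by omega))]

lemma pvDigitsRev_zero : pvDigitsRev 0 = [] := by
  rw [pvDigitsRev]; simp

-- per-element agreement of the two loop bodies, for n ≥ 0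
lemma perElem (n : Int) (h : 0 ≤ n) (acc : List Int) :
    (if (PySem.Int.toChars n).length > 1 then
        (PySem.Int.toChars n).foldl (fun res j => res ++ [pvIntOfChar j]) acc
      else acc ++ [pvIntOfChars (PySem.Int.toChars n)])
    = (if n == 0 then acc ++ [0] else acc ++ (pvDigitsRev n).reverse) := by
  rw [PySem.List.foldl_append_singleton_eq_map, toChars_eq_natDig n h]
  by_cases h0 : n = 0
  · subst h0
    rw [show ((0:Int).toNat) = 0 from rfl, natDig, dif_pos (by omega)]
    rw [if_neg (by decide), if_pos (by decide)]
    congr 1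
  · have hm : 0 < n.toNat := by omega
    have hcast : ((n.toNat : Nat) : Int) = n := by omega
    rw [if_neg (show ¬ (n == 0) = true by simp [h0])]
    by_cases h10 : n.toNat < 10
    · have hrev : (pvDigitsRev n).reverse = [n] := by
        rw [← hcast, pvDigitsRev_natCast _ hm, Nat.div_eq_of_lt h10, Nat.mod_eq_of_lt h10]
        rw [show ((0:Nat):Int) = 0 from rfl, pvDigitsRev_zero]
        simp
      rw [if_neg (show ¬ (natDig n.toNat).length > 1 by rw [natDig_length_of_lt _ h10]; omega)]
      rw [hrev, natDig, dif_pos h10]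
      congr 1
      rw [show pvIntOfChars [Nat.digitChar n.toNat] = pvIntOfChar (Nat.digitChar n.toNat) from rfl,
        pvIntOfChar_digitChar _ h10, hcast]
    · have hmap := map_natDig_eq n.toNat hm
      rw [hcast] at hmap
      rw [if_pos (show (natDig n.toNat).length > 1 from natDig_length_of_ge _ (by omega))]
      rw [hmap]

lemma main_fold (nums : List Int) (acc : List Int) (h : ∀ n ∈ nums, 0 ≤ n) :
    (nums.map (fun i => PySem.Int.toChars i)).foldl (fun res i =>
      if i.length > 1 then i.foldl (fun res j => res ++ [pvIntOfChar j]) res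
      else res ++ [pvIntOfChars i]) acc
    = nums.foldl (fun res n =>
        if n == 0 then res ++ [0] else res ++ (pvDigitsRev n).reverse) acc := by
  induction nums generalizing acc with
  | nil => rfl
  | cons n t ih =>
    simp only [List.map_cons, List.foldl_cons]
    rw [perElem n (h n (by simp)) acc]
    exact ih _ (fun x hx => h x (by simp [hx]))

-- ===== VERDICT (by name: the statement is the Claim_ definition above) =====
theorem separateDigits_spec : Claim_equal_separateDigits := by
  intro nums _ hpre
  unfold Spec_separateDigits separateDigits separateDigits_alt
  exact main_fold nums [] hpre
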